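-- pv_equiv track=rewrite | github.com/Prateek-Lohani/Recursion | 14. Replace a character in String.py | character_replace
-- ===== SOURCE A (Python) =====
-- def character_replace(s,a,x):
--     l=len(s)
--     if l==0:
--         return s
--     small_string=s[1:]
--     small_Output=character_replace(small_string,a,x)
--     if s[0]==a:
--         return x+small_Output
--     else:
--         return s[0]+small_Output
-- ===== SOURCE B (Python) =====
-- def character_replace(s, a, x):
--     result = []
--     for c in s:
--         if c == a:
--             result.append(x)
--         else:
--             result.append(c)
--     return ''.join(result)
-- ===== Notes on version B (the rewrite author's own statement) =====
-- stated objective: faster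
-- what changed: Replaces the per-character recursion (which builds the result by repeated string concatenation at each recursion level) with a single iterative loop that appends pieces to a list and joins once.
import Mathlib
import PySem

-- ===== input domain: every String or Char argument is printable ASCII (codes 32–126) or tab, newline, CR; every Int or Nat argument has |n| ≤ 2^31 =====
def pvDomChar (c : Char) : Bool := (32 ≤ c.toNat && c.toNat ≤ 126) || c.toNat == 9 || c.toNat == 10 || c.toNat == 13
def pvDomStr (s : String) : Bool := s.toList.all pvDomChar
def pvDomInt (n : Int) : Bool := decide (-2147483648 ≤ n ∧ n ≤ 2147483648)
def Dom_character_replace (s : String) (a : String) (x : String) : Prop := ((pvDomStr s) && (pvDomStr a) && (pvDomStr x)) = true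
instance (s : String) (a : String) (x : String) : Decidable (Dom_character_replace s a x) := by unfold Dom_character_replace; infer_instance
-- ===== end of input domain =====

-- B replaces A's recursion (quadratic repeated string concatenation) by one iterative
-- accumulator loop with a single join; objective: faster.


-- ===== PORT A =====
-- A's recursion over the string: s[0] is the head char, s[1:] the tail (exact, strings are
-- their char lists); 's[0] == a' compares the one-char string [c] with a.
def charRepA (l : List Char) (a : String) (x : String) : List Char :=
  match l with
  | [] => []
  | c :: rest =>
    let smallOutput := charRepA rest a x
    if [c] = a.toList then x.toList ++ smallOutput else [c] ++ smallOutput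

def character_replace (s : String) (a : String) (x : String) : String :=
  String.mk (charRepA s.toList a x)

-- ===== PORT B =====
-- B's loop: left fold over the chars, appending x or the char to the accumulator, joined at the end.
def stepB (a : String) (x : String) (acc : List Char) (c : Char) : List Char :=
  if [c] = a.toList then acc ++ x.toList else acc ++ [c]

def character_replace_alt (s : String) (a : String) (x : String) : String :=
  String.mk (s.toList.foldl (stepB a x) [])

-- ===== PRECONDITION & SPEC =====
def Spec_character_replace (s : String) (a : String) (x : String) (out : String) : Prop := out = character_replace_alt s a x
instance (s : String) (a : String) (x : String) (out : String) : Decidable (Spec_character_replace s a x out) := by unfold Spec_character_replace; infer_instance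

-- ===== CLAIM (what is proved, stated in full; the proofs are below) =====
def Claim_equal_character_replace : Prop := ∀ (s : String) (a : String) (x : String), Dom_character_replace s a x → Spec_character_replace s a x (character_replace s a x)

-- ===== LEMMAS AND PROOFS =====
theorem foldl_stepB_acc (a x : String) (l : List Char) (acc : List Char) :
    l.foldl (stepB a x) acc = acc ++ l.foldl (stepB a x) [] := by
  induction l generalizing acc with
  | nil => simp
  | cons c rest ih =>
    simp only [List.foldl_cons]
    rw [ih, ih (stepB a x [] c)]
    simp [stepB]
    split_ifs <;> simp

theorem charRepA_eq_foldl (a x : String) (l : List Char) :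
    charRepA l a x = l.foldl (stepB a x) [] := by
  induction l with
  | nil => rfl
  | cons c rest ih =>
    simp only [List.foldl_cons]
    rw [foldl_stepB_acc, ← ih]
    simp [charRepA, stepB]
    split_ifs <;> simp

-- ===== VERDICT (by name: the statement is the Claim_ definition above) =====
theorem character_replace_spec : Claim_equal_character_replace := by
  intro s a x _
  unfold Spec_character_replace character_replace character_replace_alt
  rw [charRepA_eq_foldl]
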